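-- pv_equiv track=rewrite | github.com/julienPalleau/Udemy | Tests/summerOf69.py | summer_69b
-- ===== SOURCE A (Python) =====
-- def summer_69b(arr):
--     while 6 in arr:
--         start, stop = arr.index(6), arr.index(9)+1
--         del arr[start:stop]
--     result = 0
--     for n in arr:
--         result += n
--     return result
-- ===== SOURCE B (Python) =====
-- def summer_69b(arr):
--     total = 0
--     skip = False
--     for n in arr:
--         if skip:
--             if n == 9:
--                 skip = False
--         elif n == 6:
--             skip = True
--         else:
--             total += n
--     return total
-- ===== Notes on version B (the rewrite author's own statement) =====
-- stated objective: simpler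
-- what changed: Replaces the repeated index/delete rescan loop (which mutates the list) with a single left-to-right pass carrying a skip flag between a 6 and the next 9; no mutation of the argument.
import Mathlib
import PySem

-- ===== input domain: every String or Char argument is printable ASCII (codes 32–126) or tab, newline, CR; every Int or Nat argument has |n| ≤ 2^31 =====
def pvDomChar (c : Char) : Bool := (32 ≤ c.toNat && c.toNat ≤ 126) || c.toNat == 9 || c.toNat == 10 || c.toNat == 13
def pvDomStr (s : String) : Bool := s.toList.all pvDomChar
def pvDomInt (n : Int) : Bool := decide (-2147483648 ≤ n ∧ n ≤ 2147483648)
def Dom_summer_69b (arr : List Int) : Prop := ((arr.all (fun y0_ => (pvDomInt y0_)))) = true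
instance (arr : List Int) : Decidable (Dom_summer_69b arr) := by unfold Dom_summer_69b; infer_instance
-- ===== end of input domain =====

-- B replaces A's repeated index/delete rescans with one single pass carrying a skip flag
-- (objective: simpler). Python A mutates its argument (del arr[start:stop]); B does not:
-- the equivalence proved here is about the RETURN value only.

-- ===== PORT A =====
-- while 6 in arr: del arr[arr.index(6) : arr.index(9)+1]
-- The fuel argument only makes the while-loop total: inside Pre_ every iteration removes
-- at least 2 elements, so fuel = arr.length + 1 is never exhausted.  When arr.index(9)
-- fails Python raises ValueError (excluded by Pre_); the port stops there.
def summer_69b_loop : Nat → List Int → List Int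
  | 0, arr => arr
  | fuel+1, arr =>
    if arr.contains 6 then
      match PySem.List.index? arr 6, PySem.List.index? arr 9 with
      | some s, some j =>
          summer_69b_loop fuel
            (PySem.List.slice arr none (some (s : Int)) ++
             PySem.List.slice arr (some ((j : Int) + 1)) none)
      | _, _ => arr   -- Python: ValueError (no 9 while a 6 is present); outside Pre_
    else arr

def summer_69b (arr : List Int) : Int :=
  (summer_69b_loop (arr.length + 1) arr).foldl (fun result n => result + n) 0

-- ===== PORT B =====
-- the loop body of Source B: state = (total, skip)
def summer69bAltStep (st : Int × Bool) (n : Int) : Int × Bool :=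
  if st.2 then (if n = 9 then (st.1, false) else st)
  else if n = 6 then (st.1, true)
  else (st.1 + n, st.2)

def summer_69b_alt (arr : List Int) : Int :=
  (arr.foldl summer69bAltStep (0, false)).1

-- ===== PRECONDITION & SPEC =====
-- Pre_ excludes exactly the inputs where Python A does not return: it raises ValueError
-- when a 6 is present with no 9 left, and loops forever when the first 9 does not come
-- after the first 6 (del removes nothing).  preScan walks the list once with the
-- in-span flag: a 6 outside a span must be closed by a later 9, and a 9 outside a span
-- must not be followed by another 6.
def summer69bPreScan : Bool → List Int → Bool
  | false, [] => true
  | true, [] => false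
  | false, x :: xs =>
      if x = 6 then summer69bPreScan true xs
      else if x = 9 then !(xs.contains 6)
      else summer69bPreScan false xs
  | true, x :: xs => if x = 9 then summer69bPreScan false xs else summer69bPreScan true xs

def Pre_summer_69b (arr : List Int) : Prop := summer69bPreScan false arr = true
instance (arr : List Int) : Decidable (Pre_summer_69b arr) := by unfold Pre_summer_69b; infer_instance

def pvWitness_summer_69b : List Int := [4, 6, 1, 9, 5, 9, 2]

def Spec_summer_69b (arr : List Int) (out : Int) : Prop := out = summer_69b_alt arr
instance (arr : List Int) (out : Int) : Decidable (Spec_summer_69b arr out) := by unfold Spec_summer_69b; infer_instance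

-- ===== CLAIM (what is proved, stated in full; the proofs are below) =====
def Claim_equal_summer_69b : Prop := ∀ (arr : List Int), Dom_summer_69b arr → Pre_summer_69b arr → Spec_summer_69b arr (summer_69b arr)

-- ===== LEMMAS AND PROOFS =====

theorem summer69b_notMemCons {a x : Int} {l : List Int} (hx : x ≠ a) (hl : a ∉ l) : a ∉ x :: l := by
  intro hm
  rcases List.mem_cons.mp hm with h | h
  · exact hx h.symm
  · exact hl h

-- B's fold over a 6-free prefix just adds it up and stays outside a span.
theorem altStep_foldl_no6 (p : List Int) (t : Int) (h : 6 ∉ p) :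
    p.foldl summer69bAltStep (t, false) = (t + p.sum, false) := by
  induction p generalizing t with
  | nil => simp
  | cons x xs ih =>
    have hx : x ≠ 6 := by intro hx; exact h (by simp [hx])
    have hxs : 6 ∉ xs := fun hm => h (List.mem_cons_of_mem _ hm)
    simp only [List.foldl_cons]
    rw [show summer69bAltStep (t, false) x = (t + x, false) from by simp [summer69bAltStep, hx]]
    rw [ih _ hxs]
    simp [add_assoc]

-- B's fold over a 9-free span skips everything.
theorem altStep_foldl_no9 (m : List Int) (t : Int) (h : 9 ∉ m) :
    m.foldl summer69bAltStep (t, true) = (t, true) := by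
  induction m with
  | nil => simp
  | cons x xs ih =>
    have hx : x ≠ 9 := by intro hx; exact h (by simp [hx])
    have hxs : 9 ∉ xs := fun hm => h (List.mem_cons_of_mem _ hm)
    simp only [List.foldl_cons, summer69bAltStep, hx, if_true, if_false]
    simpa [hx] using ih hxs

-- decomposition of a successful scan in the in-span state
theorem preScan_true_decomp (xs : List Int) (h : summer69bPreScan true xs = true) :
    ∃ m r, xs = m ++ 9 :: r ∧ 9 ∉ m ∧ summer69bPreScan false r = true := by
  induction xs with
  | nil => simp [summer69bPreScan] at h
  | cons x xs ih =>
    by_cases hx : x = 9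
    · exact ⟨[], xs, by simp [hx], by simp, by simpa [summer69bPreScan, hx] using h⟩
    · have h' : summer69bPreScan true xs = true := by simpa [summer69bPreScan, hx] using h
      obtain ⟨m, r, hr, hm, hscan⟩ := ih h'
      exact ⟨x :: m, r, by simp [hr], summer69b_notMemCons hx hm, hscan⟩

-- decomposition of a successful scan that still contains a 6
theorem preScan_false_decomp (arr : List Int) (h : summer69bPreScan false arr = true)
    (h6 : 6 ∈ arr) :
    ∃ p m r, arr = p ++ 6 :: m ++ 9 :: r ∧ 6 ∉ p ∧ 9 ∉ p ∧ 9 ∉ m ∧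
      summer69bPreScan false r = true := by
  induction arr with
  | nil => simp at h6
  | cons x xs ih =>
    by_cases hx6 : x = 6
    · have h' : summer69bPreScan true xs = true := by simpa [summer69bPreScan, hx6] using h
      obtain ⟨m, r, hr, hm, hscan⟩ := preScan_true_decomp xs h'
      exact ⟨[], m, r, by simp [hx6, hr], by simp, by simp, hm, hscan⟩
    · have hxs6 : 6 ∈ xs := by
        rcases List.mem_cons.mp h6 with h | h
        · exact absurd h.symm hx6
        · exact h
      by_cases hx9 : x = 9
      · exfalso
        have : (xs.contains 6) = false := by
          have := h; simp [summer69bPreScan, hx9] at this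
          simpa using this
        rw [List.contains_eq_mem] at this
        simp [hxs6] at this
      · have h' : summer69bPreScan false xs = true := by
          simpa [summer69bPreScan, hx6, hx9] using h
        obtain ⟨p, m, r, hr, hp6, hp9, hm, hscan⟩ := ih h' hxs6
        exact ⟨x :: p, m, r, by simp [hr], summer69b_notMemCons hx6 hp6,
          summer69b_notMemCons hx9 hp9, hm, hscan⟩

-- a 6-free, 9-free prefix is transparent to the scan
theorem preScan_false_append (p r : List Int) (hp6 : 6 ∉ p) (hp9 : 9 ∉ p) :
    summer69bPreScan false (p ++ r) = summer69bPreScan false r := by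
  induction p with
  | nil => simp
  | cons x xs ih =>
    have hx6 : x ≠ 6 := fun hx => hp6 (by simp [hx])
    have hx9 : x ≠ 9 := fun hx => hp9 (by simp [hx])
    have := ih (fun hm => hp6 (List.mem_cons_of_mem _ hm))
               (fun hm => hp9 (List.mem_cons_of_mem _ hm))
    simpa [summer69bPreScan, hx6, hx9] using this

theorem index?_of_decomp (pre suf : List Int) (v : Int) (hv : v ∉ pre) :
    PySem.List.index? (pre ++ v :: suf) v = some pre.length :=
  (PySem.List.index?_eq_some_iff _ _ _).mpr ⟨pre, suf, rfl, rfl, hv⟩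

-- the main invariant: inside Pre_ with enough fuel, A's while-loop sums to B's value
theorem summer69b_main (fuel : Nat) (arr : List Int)
    (hpre : summer69bPreScan false arr = true) (hfuel : arr.length < fuel) :
    (summer_69b_loop fuel arr).foldl (fun result n => result + n) 0 =
      summer_69b_alt arr := by
  induction fuel generalizing arr with
  | zero => omega
  | succ fuel ih =>
    by_cases h6 : 6 ∈ arr
    · obtain ⟨p, m, r, harr, hp6, hp9, hm9, hscan⟩ := preScan_false_decomp arr hpre h6
      have hidx6 : PySem.List.index? arr 6 = some p.length := by
        rw [harr]; simpa using index?_of_decomp p (m ++ 9 :: r) 6 hp6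
      have hidx9 : PySem.List.index? arr 9 = some (p.length + m.length + 1) := by
        have h9pre : (9 : Int) ∉ p ++ 6 :: m := by
          simp [List.mem_append, hp9, hm9]
        have : PySem.List.index? ((p ++ 6 :: m) ++ 9 :: r) 9 = some (p ++ 6 :: m).length :=
          index?_of_decomp (p ++ 6 :: m) r 9 h9pre
        rw [harr]
        simpa [List.append_assoc, Nat.add_comm, Nat.add_left_comm] using this
      have hslice1 : PySem.List.slice arr none (some ((p.length : Nat) : Int)) = p := by
        rw [PySem.List.slice_to_natCast, harr]
        simp
      have hslice2 :
          PySem.List.slice arr (some (((p.length + m.length + 1 : Nat) : Int) + 1)) none = r := by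
        have hcast : (((p.length + m.length + 1 : Nat) : Int) + 1)
            = ((p.length + m.length + 2 : Nat) : Int) := by push_cast; ring
        rw [hcast, PySem.List.slice_from_natCast, harr]
        have hlen : (p ++ 6 :: m ++ [9]).length = p.length + m.length + 2 := by
          simp; omega
        have : (p ++ 6 :: m ++ [9]) ++ r = p ++ 6 :: m ++ 9 :: r := by simp
        rw [← this, ← hlen, List.drop_left]
      have hcontains : arr.contains 6 = true := by
        rw [List.contains_eq_mem]; simp [h6]
      have hloop : summer_69b_loop (fuel + 1) arr = summer_69b_loop fuel (p ++ r) := by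
        rw [summer_69b_loop, hcontains, if_pos rfl, hidx6, hidx9]
        simp only [hslice1, hslice2]
      have hprer : summer69bPreScan false (p ++ r) = true := by
        rw [preScan_false_append p r hp6 hp9]; exact hscan
      have hlen : (p ++ r).length < fuel := by
        have : arr.length = p.length + m.length + 2 + r.length := by
          rw [harr]; simp; omega
        simp only [List.length_append]
        omega
      -- B gives the same value on arr and on p ++ r
      have hBarr : summer_69b_alt (p ++ 6 :: m ++ 9 :: r) = summer_69b_alt (p ++ r) := by
        unfold summer_69b_alt
        simp only [List.foldl_append]
        rw [altStep_foldl_no6 p 0 hp6]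
        rw [List.foldl_cons (l := m),
          show summer69bAltStep (0 + p.sum, false) 6 = (0 + p.sum, true) from by
            simp [summer69bAltStep]]
        rw [altStep_foldl_no9 m _ hm9]
        rw [List.foldl_cons,
          show summer69bAltStep (0 + p.sum, true) 9 = (0 + p.sum, false) from by
            simp [summer69bAltStep]]
      rw [hloop, ih (p ++ r) hprer hlen, harr]
      exact hBarr.symm
    · have hcontains : arr.contains 6 = false := by
        rw [List.contains_eq_mem]; simp [h6]
      have hloop : summer_69b_loop (fuel + 1) arr = arr := by
        rw [summer_69b_loop, hcontains]; simp
      rw [hloop]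
      unfold summer_69b_alt
      rw [altStep_foldl_no6 arr 0 h6]
      simpa using PySem.List.foldl_add arr (fun n : Int => n) 0

-- ===== VERDICT (by name: the statement is the Claim_ definition above) =====
theorem summer_69b_spec : Claim_equal_summer_69b := by
  intro arr _ hpre
  unfold Spec_summer_69b summer_69b
  exact summer69b_main (arr.length + 1) arr hpre (by omega)
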